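-- pv_equiv track=rewrite | github.com/NachoTek/minedetector | src/game/mine_placement.py | _get_protected_zone
-- ===== SOURCE A (Python) =====
-- from typing import List, Tuple
--
-- def _get_protected_zone(
--     first_click_row: int, first_click_col: int, rows: int, cols: int
-- ) -> List[Tuple[int, int]]:
--     """
--     Get the list of cells that must be kept mine-free (first-click and neighbors).
--
--     The protected zone consists of the first-click cell and all 8 of its
--     neighboring cells. Neighbors are defined using the 8-directional movement
--     pattern (horizontal, vertical, and diagonal).
--
--     Args:
--         first_click_row: Row index of the first-click cell (0-based).
--         first_click_col: Column index of the first-click cell (0-based).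
--         rows: Number of rows in the grid.
--         cols: Number of columns in the grid.
--
--     Returns:
--         List of (row, col) tuples representing all protected cells.
--         All coordinates are within board bounds.
--
--     Example:
--         >>> _get_protected_zone(4, 4, 9, 9)
--         [(3, 3), (3, 4), (3, 5), (4, 3), (4, 4), (4, 5), (5, 3), (5, 4), (5, 5)]
--     """
--     protected = []
--
--     # Check all 8 directions around the first-click cell
--     for dr in [-1, 0, 1]:
--         for dc in [-1, 0, 1]:
--             row = first_click_row + dr
--             col = first_click_col + dc
--
--             # Only add coordinates that are within bounds
--             if 0 <= row < rows and 0 <= col < cols: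
--                 protected.append((row, col))
--
--     return protected
-- ===== SOURCE B (Python) =====
-- from typing import List, Tuple
--
--
-- def _get_protected_zone(
--     first_click_row: int, first_click_col: int, rows: int, cols: int
-- ) -> List[Tuple[int, int]]:
--     """Compute the clipped window's origin and shape, then emit its cells from a
--     single flat index k via divmod (row-major), instead of nested neighbor loops."""
--     r0 = max(0, first_click_row - 1)
--     c0 = max(0, first_click_col - 1)
--     h = min(rows, first_click_row + 2) - r0
--     w = min(cols, first_click_col + 2) - c0
--     if h <= 0 or w <= 0:
--         return []
--     return [(r0 + k // w, c0 + k % w) for k in range(h * w)]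
-- ===== Notes on version B (the rewrite author's own statement) =====
-- stated objective: alternative
-- what changed: B computes the clipped window's origin (r0,c0) and shape (h,w) first, then emits the cells in one flat loop over k in range(h*w) via divmod (r0+k//w, c0+k%w), instead of A's nested offset loops with a per-cell bounds check.
import Mathlib
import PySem

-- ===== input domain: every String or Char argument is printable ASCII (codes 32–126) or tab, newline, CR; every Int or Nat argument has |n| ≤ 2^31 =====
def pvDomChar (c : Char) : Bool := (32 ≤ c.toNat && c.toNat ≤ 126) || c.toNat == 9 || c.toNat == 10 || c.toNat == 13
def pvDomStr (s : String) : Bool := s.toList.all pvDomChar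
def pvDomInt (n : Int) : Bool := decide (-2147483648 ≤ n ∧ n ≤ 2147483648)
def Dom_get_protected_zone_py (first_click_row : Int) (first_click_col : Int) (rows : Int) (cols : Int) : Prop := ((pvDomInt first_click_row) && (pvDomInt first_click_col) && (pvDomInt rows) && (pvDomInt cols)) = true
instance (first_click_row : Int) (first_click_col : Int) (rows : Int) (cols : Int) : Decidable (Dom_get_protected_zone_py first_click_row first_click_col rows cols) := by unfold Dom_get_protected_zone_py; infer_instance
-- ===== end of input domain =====

-- B computes the clipped window's origin (r0,c0) and shape (h,w) first and emits
-- the cells in ONE flat loop over k in range(h*w) via divmod, instead of A's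
-- nested offset loops with a per-cell bounds check (alternative decomposition).

-- ===== PORT A =====
def get_protected_zone_py (first_click_row : Int) (first_click_col : Int) (rows : Int) (cols : Int) : List (Int × Int) :=
  ([-1, 0, 1] : List Int).foldl (fun protected_ dr =>
    ([-1, 0, 1] : List Int).foldl (fun protected_ dc =>
      let row := first_click_row + dr
      let col := first_click_col + dc
      if (0 ≤ row ∧ row < rows) ∧ (0 ≤ col ∧ col < cols) then protected_ ++ [(row, col)]
      else protected_) protected_) []

-- ===== PORT B =====
def get_protected_zone_py_alt (first_click_row : Int) (first_click_col : Int) (rows : Int) (cols : Int) : List (Int × Int) :=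
  let r0 := max 0 (first_click_row - 1)
  let c0 := max 0 (first_click_col - 1)
  let h := min rows (first_click_row + 2) - r0
  let w := min cols (first_click_col + 2) - c0
  if h ≤ 0 ∨ w ≤ 0 then []
  else (PySem.List.pyRange 0 (h * w) 1).map
    (fun k => (r0 + PySem.Int.floordiv k w, c0 + PySem.Int.mod k w))

-- ===== PRECONDITION & SPEC =====
def Spec_get_protected_zone_py (first_click_row : Int) (first_click_col : Int) (rows : Int) (cols : Int) (out : List (Int × Int)) : Prop := out = get_protected_zone_py_alt first_click_row first_click_col rows cols
instance (first_click_row : Int) (first_click_col : Int) (rows : Int) (cols : Int) (out : List (Int × Int)) : Decidable (Spec_get_protected_zone_py first_click_row first_click_col rows cols out) := by unfold Spec_get_protected_zone_py; infer_instance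

-- ===== CLAIM (what is proved, stated in full; the proofs are below) =====
def Claim_equal_get_protected_zone_py : Prop := ∀ (first_click_row : Int) (first_click_col : Int) (rows : Int) (cols : Int), Dom_get_protected_zone_py first_click_row first_click_col rows cols → Spec_get_protected_zone_py first_click_row first_click_col rows cols (get_protected_zone_py first_click_row first_click_col rows cols)

-- ===== LEMMAS AND PROOFS =====

-- the clamped range is exactly the in-bounds part of {x-1, x, x+1}, as shifted deltas
theorem pv_win (x n : Int) :
    PySem.List.pyRange (max 0 (x - 1)) (min n (x + 2)) 1 =
      (([-1, 0, 1] : List Int).filter (fun d => decide (0 ≤ x + d ∧ x + d < n))).map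
        (fun d => x + d) := by
  have hL : (PySem.List.pyRange (max 0 (x - 1)) (min n (x + 2)) 1).Pairwise (· < ·) :=
    PySem.List.pairwise_lt_pyRange_one _ _
  have hR : ((([-1, 0, 1] : List Int).filter (fun d => decide (0 ≤ x + d ∧ x + d < n))).map
      (fun d => x + d)).Pairwise (· < ·) := by
    have base : (([-1, 0, 1] : List Int).filter
        (fun d => decide (0 ≤ x + d ∧ x + d < n))).Pairwise (· < ·) :=
      List.Pairwise.filter _ (by decide)
    exact List.Pairwise.map _ (fun a b h => by omega) base
  have hmem : ∀ v, v ∈ PySem.List.pyRange (max 0 (x - 1)) (min n (x + 2)) 1 ↔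
      v ∈ (([-1, 0, 1] : List Int).filter (fun d => decide (0 ≤ x + d ∧ x + d < n))).map
        (fun d => x + d) := by
    intro v
    simp only [PySem.List.mem_pyRange_one, List.mem_map, List.mem_filter,
      List.mem_cons, decide_eq_true_eq, List.not_mem_nil, or_false]
    constructor
    · intro h
      exact ⟨v - x, by omega, by omega⟩
    · rintro ⟨d, hd, hb, rfl⟩
      omega
  exact List.Perm.eq_of_pairwise (fun a b _ _ h1 h2 => absurd h2 (lt_asymm h1)) hL hR
    ((List.perm_ext_iff_of_nodup
        (hL.imp fun h => ne_of_lt h) (hR.imp fun h => ne_of_lt h)).mpr hmem)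

theorem pv_flatMap_ite_filter {α β : Type} (l : List α) (p : α → Bool) (g : α → List β) :
    l.flatMap (fun x => if p x then g x else []) = (l.filter p).flatMap g := by
  induction l with
  | nil => rfl
  | cons a l ih =>
    simp only [List.flatMap_cons, List.filter_cons]
    by_cases h : p a = true <;> simp [h, ih]

-- A equals the nested-window form: row-major flatMap over the two clamped ranges
theorem pv_a_eq_window (first_click_row first_click_col rows cols : Int) :
    get_protected_zone_py first_click_row first_click_col rows cols =
      (PySem.List.pyRange (max 0 (first_click_row - 1)) (min rows (first_click_row + 2)) 1).flatMap
        (fun row =>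
          (PySem.List.pyRange (max 0 (first_click_col - 1)) (min cols (first_click_col + 2)) 1).map
            (fun col => (row, col))) := by
  unfold get_protected_zone_py
  simp only [PySem.List.foldl_append_ite, PySem.List.foldl_append_eq_flatMap,
    List.nil_append]
  rw [pv_win first_click_row rows, pv_win first_click_col cols, List.flatMap_map]
  have hbody : ∀ dr : Int,
      (([-1, 0, 1] : List Int).filter
          (fun dc => decide ((0 ≤ first_click_row + dr ∧ first_click_row + dr < rows) ∧
            (0 ≤ first_click_col + dc ∧ first_click_col + dc < cols)))).map
        (fun dc => (first_click_row + dr, first_click_col + dc)) =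
      if decide (0 ≤ first_click_row + dr ∧ first_click_row + dr < rows) then
        ((([-1, 0, 1] : List Int).filter
            (fun dc => decide (0 ≤ first_click_col + dc ∧ first_click_col + dc < cols))).map
          (fun dc => first_click_col + dc)).map
          (fun col => (first_click_row + dr, col))
      else [] := by
    intro dr
    by_cases h : 0 ≤ first_click_row + dr ∧ first_click_row + dr < rows
    · rw [if_pos (by simpa using h), List.map_map]
      exact congrArg _ (List.filter_congr (fun dc _ => by simp [h]))
    · rw [if_neg (by simpa using h)]
      rw [List.filter_eq_nil_iff.mpr (fun dc _ => by simp [h]), List.map_nil]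
  calc ([-1, 0, 1] : List Int).flatMap _
      = ([-1, 0, 1] : List Int).flatMap (fun dr =>
          if decide (0 ≤ first_click_row + dr ∧ first_click_row + dr < rows) then
            ((([-1, 0, 1] : List Int).filter
                (fun dc => decide (0 ≤ first_click_col + dc ∧ first_click_col + dc < cols))).map
              (fun dc => first_click_col + dc)).map
              (fun col => (first_click_row + dr, col))
          else []) := by
        exact List.flatMap_congr (fun dr _ => hbody dr)
    _ = _ := by
        rw [pv_flatMap_ite_filter]

theorem pv_pyRange_shift (a b t : Int) :
    PySem.List.pyRange (a + t) (b + t) 1 = (PySem.List.pyRange a b 1).map (· + t) := by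
  simp only [PySem.List.pyRange_one, List.map_map]
  have : (b + t) - (a + t) = b - a := by ring
  rw [this]
  exact List.map_congr_left (fun k _ => by simp; ring)

-- the k-th row chunk of the flat loop is the column range of row r0 + n
theorem pv_chunk (r0 c0 w : Int) (hw : 0 < w) (n : Int) :
    (PySem.List.pyRange (n * w) (n * w + w) 1).map
        (fun k => (r0 + PySem.Int.floordiv k w, c0 + PySem.Int.mod k w)) =
      (PySem.List.pyRange c0 (c0 + w) 1).map (fun col => (r0 + n, col)) := by
  have h1 : PySem.List.pyRange (n * w) (n * w + w) 1 =
      (PySem.List.pyRange 0 w 1).map (· + n * w) := by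
    rw [show n * w + w = w + n * w from by ring]
    simpa using pv_pyRange_shift 0 w (n * w)
  have h2 : PySem.List.pyRange c0 (c0 + w) 1 =
      (PySem.List.pyRange 0 w 1).map (· + c0) := by
    have := pv_pyRange_shift 0 w c0
    simpa [add_comm] using this
  rw [h1, h2, List.map_map, List.map_map]
  refine List.map_congr_left (fun k hk => ?_)
  rw [PySem.List.mem_pyRange_one] at hk
  have hfd : PySem.Int.floordiv (k + n * w) w = n := by
    rw [PySem.Int.floordiv_eq_iff_of_pos hw]
    constructor <;> nlinarith [hk.1, hk.2]
  have hmd : PySem.Int.mod (k + n * w) w = k := by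
    have := PySem.Int.floordiv_mul_add_mod (k + n * w) w
    rw [hfd] at this
    omega
  simp [hfd, hmd, add_comm]

-- the flat divmod loop equals the nested-window form, by induction on the height
theorem pv_flat_eq (r0 c0 w : Int) (hw : 0 < w) : ∀ (n : Nat),
    (PySem.List.pyRange 0 ((n : Int) * w) 1).map
        (fun k => (r0 + PySem.Int.floordiv k w, c0 + PySem.Int.mod k w)) =
      (PySem.List.pyRange r0 (r0 + (n : Int)) 1).flatMap
        (fun row => (PySem.List.pyRange c0 (c0 + w) 1).map (fun col => (row, col))) := by
  intro n
  induction n with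
  | zero =>
    simp [PySem.List.pyRange_one_eq_nil]
  | succ n ih =>
    have hcast : ((n + 1 : Nat) : Int) = (n : Int) + 1 := by push_cast; ring
    rw [hcast]
    have hrowsplit : PySem.List.pyRange r0 (r0 + ((n : Int) + 1)) 1 =
        PySem.List.pyRange r0 (r0 + (n : Int)) 1 ++ [r0 + (n : Int)] := by
      have : r0 + ((n : Int) + 1) = (r0 + (n : Int)) + 1 := by ring
      rw [this, PySem.List.pyRange_one_succ_right (by omega : r0 ≤ r0 + (n : Int))]
    have hksplit : PySem.List.pyRange 0 (((n : Int) + 1) * w) 1 =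
        PySem.List.pyRange 0 ((n : Int) * w) 1 ++
          PySem.List.pyRange ((n : Int) * w) ((n : Int) * w + w) 1 := by
      have h2 : ((n : Int) + 1) * w = (n : Int) * w + w := by ring
      rw [h2, PySem.List.pyRange_one_append 0 ((n : Int) * w) _ (by positivity) (by omega)]
    rw [hksplit, hrowsplit, List.map_append, List.flatMap_append, ih,
      pv_chunk r0 c0 w hw (n : Int)]
    simp

-- B equals the nested-window form
theorem pv_b_eq_window (first_click_row first_click_col rows cols : Int) :
    get_protected_zone_py_alt first_click_row first_click_col rows cols =
      (PySem.List.pyRange (max 0 (first_click_row - 1)) (min rows (first_click_row + 2)) 1).flatMap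
        (fun row =>
          (PySem.List.pyRange (max 0 (first_click_col - 1)) (min cols (first_click_col + 2)) 1).map
            (fun col => (row, col))) := by
  simp only [get_protected_zone_py_alt]
  set r0 := max 0 (first_click_row - 1) with hr0
  set c0 := max 0 (first_click_col - 1) with hc0
  set rt := min rows (first_click_row + 2) with hrt
  set ct := min cols (first_click_col + 2) with hct
  split_ifs with hg
  · rcases hg with hg | hg
    · rw [PySem.List.pyRange_one_eq_nil (show rt ≤ r0 by omega)]
      rfl
    · rw [PySem.List.pyRange_one_eq_nil (show ct ≤ c0 by omega)]
      simp
  · rw [not_or] at hg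
    obtain ⟨n, hn⟩ : ∃ n : Nat, rt - r0 = (n : Int) := ⟨(rt - r0).toNat, by omega⟩
    rw [show rt = r0 + (n : Int) from by omega, show ct = c0 + (ct - c0) from by ring,
      show (r0 + (n : Int)) - r0 = (n : Int) from by ring,
      show (c0 + (ct - c0)) - c0 = ct - c0 from by ring]
    exact pv_flat_eq r0 c0 (ct - c0) (by omega) n

-- ===== VERDICT (by name: the statement is the Claim_ definition above) =====
theorem get_protected_zone_py_spec : Claim_equal_get_protected_zone_py := by
  intro r c rows cols _
  unfold Spec_get_protected_zone_py
  rw [pv_a_eq_window, pv_b_eq_window]
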